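-- pv_equiv track=rewrite | github.com/data-models-group6/data-models-final-backend | app/services/redis_service.py | classify_by_music_simple
-- ===== SOURCE A (Python) =====
-- def classify_by_music_simple(all_data, my_user_id, my_track_id, my_artist_id):
--     same_track = []
--     same_artist = []
--     just_near = []
--
--     for d in all_data:
--         if not d:
--             continue
--
--         uid = d.get("user_id")
--         track = d.get("track_id")
--         artist = d.get("artist_id")
--
--         # 排除自己
--         if uid == my_user_id:
--             continue
--
--         # ✔ 同首歌
--         if track == my_track_id:
--             same_track.append(d)
--             continue
--
--         # ✔ 同歌手 + 不同歌
--         if artist == my_artist_id and track != my_track_id: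
--             same_artist.append(d)
--
--         if artist != my_artist_id:
--             just_near.append(d)
--
--
--     return {
--         "same_track": same_track,
--         "same_artist": same_artist,
--         "just_near": just_near
--     }
-- ===== SOURCE B (Python) =====
-- def classify_by_music_simple(all_data, my_user_id, my_track_id, my_artist_id):
--     def others(d):
--         return d and d.get("user_id") != my_user_id
--
--     same_track = [d for d in all_data
--                   if others(d) and d.get("track_id") == my_track_id]
--     same_artist = [d for d in all_data
--                    if others(d) and d.get("track_id") != my_track_id
--                    and d.get("artist_id") == my_artist_id]
--     just_near = [d for d in all_data
--                  if others(d) and d.get("track_id") != my_track_id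
--                  and d.get("artist_id") != my_artist_id]
--
--     return {
--         "same_track": same_track,
--         "same_artist": same_artist,
--         "just_near": just_near
--     }
-- ===== Notes on version B (the rewrite author's own statement) =====
-- stated objective: simpler
-- what changed: Replaced the single accumulator loop with continue-based dispatch by three independent filter passes, one per output bucket, each with its own self-contained predicate.
import Mathlib
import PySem

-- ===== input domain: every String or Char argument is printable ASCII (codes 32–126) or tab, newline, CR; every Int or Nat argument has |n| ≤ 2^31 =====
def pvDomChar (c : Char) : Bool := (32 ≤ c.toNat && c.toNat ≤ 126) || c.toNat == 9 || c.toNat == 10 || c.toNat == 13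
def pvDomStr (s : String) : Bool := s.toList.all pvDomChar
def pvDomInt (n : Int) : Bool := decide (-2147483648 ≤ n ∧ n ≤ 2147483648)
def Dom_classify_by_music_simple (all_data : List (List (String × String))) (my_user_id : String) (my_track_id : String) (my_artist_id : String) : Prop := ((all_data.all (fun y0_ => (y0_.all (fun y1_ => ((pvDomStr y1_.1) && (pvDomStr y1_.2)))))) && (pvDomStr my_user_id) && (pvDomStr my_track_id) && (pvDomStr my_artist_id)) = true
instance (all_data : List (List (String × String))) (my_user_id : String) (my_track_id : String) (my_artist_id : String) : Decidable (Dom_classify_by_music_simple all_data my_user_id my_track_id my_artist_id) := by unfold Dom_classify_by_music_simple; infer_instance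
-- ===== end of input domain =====

-- B builds each of the three buckets with its own independent filter pass instead of A's
-- single loop with continue-based dispatch (objective: simpler; return value only).


-- d.get(k): first-match lookup in the association list (Python dict keys are unique)
def pvGet (d : List (String × String)) (k : String) : Option String :=
  (PySem.Dict.mk d).get? k

-- ===== PORT A =====
-- one loop over all_data carrying the three buckets, continue-based dispatch
def pvStepA (my_user_id my_track_id my_artist_id : String)
    (acc : List (List (String × String)) × List (List (String × String)) × List (List (String × String)))
    (d : List (String × String)) :
    List (List (String × String)) × List (List (String × String)) × List (List (String × String)) :=
  let (st, sa, jn) := acc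
  if d = [] then (st, sa, jn)
  else
    let uid := pvGet d "user_id"
    let track := pvGet d "track_id"
    let artist := pvGet d "artist_id"
    if uid = some my_user_id then (st, sa, jn)
    else if track = some my_track_id then (st ++ [d], sa, jn)
    else
      let sa' := if artist = some my_artist_id ∧ track ≠ some my_track_id then sa ++ [d] else sa
      let jn' := if artist ≠ some my_artist_id then jn ++ [d] else jn
      (st, sa', jn')

def classify_by_music_simple (all_data : List (List (String × String))) (my_user_id : String) (my_track_id : String) (my_artist_id : String) : List (String × List (List (String × String))) :=
  let res := all_data.foldl (pvStepA my_user_id my_track_id my_artist_id) ([], [], [])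
  [("same_track", res.1), ("same_artist", res.2.1), ("just_near", res.2.2)]

-- ===== PORT B =====
-- others(d): d is truthy and belongs to another user
def pvOthers (my_user_id : String) (d : List (String × String)) : Bool :=
  decide (d ≠ []) && decide (pvGet d "user_id" ≠ some my_user_id)

def classify_by_music_simple_alt (all_data : List (List (String × String))) (my_user_id : String) (my_track_id : String) (my_artist_id : String) : List (String × List (List (String × String))) :=
  let same_track := all_data.filter (fun d =>
    pvOthers my_user_id d && decide (pvGet d "track_id" = some my_track_id))
  let same_artist := all_data.filter (fun d =>
    pvOthers my_user_id d && decide (pvGet d "track_id" ≠ some my_track_id)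
      && decide (pvGet d "artist_id" = some my_artist_id))
  let just_near := all_data.filter (fun d =>
    pvOthers my_user_id d && decide (pvGet d "track_id" ≠ some my_track_id)
      && decide (pvGet d "artist_id" ≠ some my_artist_id))
  [("same_track", same_track), ("same_artist", same_artist), ("just_near", just_near)]

-- ===== PRECONDITION & SPEC =====
def Spec_classify_by_music_simple (all_data : List (List (String × String))) (my_user_id : String) (my_track_id : String) (my_artist_id : String) (out : List (String × List (List (String × String)))) : Prop := out = classify_by_music_simple_alt all_data my_user_id my_track_id my_artist_id
instance (all_data : List (List (String × String))) (my_user_id : String) (my_track_id : String) (my_artist_id : String) (out : List (String × List (List (String × String)))) : Decidable (Spec_classify_by_music_simple all_data my_user_id my_track_id my_artist_id out) := by unfold Spec_classify_by_music_simple; infer_instance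

-- ===== CLAIM (what is proved, stated in full; the proofs are below) =====
def Claim_equal_classify_by_music_simple : Prop := ∀ (all_data : List (List (String × String))) (my_user_id : String) (my_track_id : String) (my_artist_id : String), Dom_classify_by_music_simple all_data my_user_id my_track_id my_artist_id → Spec_classify_by_music_simple all_data my_user_id my_track_id my_artist_id (classify_by_music_simple all_data my_user_id my_track_id my_artist_id)

-- ===== LEMMAS AND PROOFS =====
-- loop invariant: the fold from (st, sa, jn) appends exactly the three filters
theorem pvFoldA_eq (mu mt ma : String) (xs : List (List (String × String)))
    (st sa jn : List (List (String × String))) :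
    xs.foldl (pvStepA mu mt ma) (st, sa, jn) =
      (st ++ xs.filter (fun d => pvOthers mu d && decide (pvGet d "track_id" = some mt)),
       sa ++ xs.filter (fun d => pvOthers mu d && decide (pvGet d "track_id" ≠ some mt)
                && decide (pvGet d "artist_id" = some ma)),
       jn ++ xs.filter (fun d => pvOthers mu d && decide (pvGet d "track_id" ≠ some mt)
                && decide (pvGet d "artist_id" ≠ some ma))) := by
  induction xs generalizing st sa jn with
  | nil => simp
  | cons d t ih =>
    simp only [List.foldl_cons, List.filter_cons]
    by_cases h0 : d = []
    · simp [pvStepA, pvOthers, h0, ih]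
    · by_cases h1 : pvGet d "user_id" = some mu
      · simp [pvStepA, pvOthers, h0, h1, ih]
      · by_cases h2 : pvGet d "track_id" = some mt
        · simp [pvStepA, pvOthers, h0, h1, h2, ih]
        · by_cases h3 : pvGet d "artist_id" = some ma
          · simp [pvStepA, pvOthers, h0, h1, h2, h3, ih]
          · simp [pvStepA, pvOthers, h0, h1, h2, h3, ih]

-- ===== VERDICT (by name: the statement is the Claim_ definition above) =====
theorem classify_by_music_simple_spec : Claim_equal_classify_by_music_simple := by
  intro all_data mu mt ma _
  unfold Spec_classify_by_music_simple classify_by_music_simple classify_by_music_simple_alt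
  rw [pvFoldA_eq]
  simp
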